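-- pv_equiv track=rewrite | github.com/Horef/lcc_final | encoder.py | calculate_optimal_num_heads
-- ===== SOURCE A (Python) =====
-- def calculate_optimal_num_heads(input_dim, max_heads=16, preferred_heads=None):
--     """
--     Calculate the optimal number of attention heads for a given input dimension.
--
--     Args:
--         input_dim (int): The input dimension
--         max_heads (int): Maximum number of heads to consider
--         preferred_heads (int, optional): Preferred number of heads (will find closest valid)
--
--     Returns:
--         int: Optimal number of heads that divides input_dim
--     """
--     if preferred_heads is not None:
--         # If a specific number is preferred, find the closest valid one
--         if input_dim % preferred_heads == 0:
--             return preferred_heads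
--
--         # Find the closest valid number of heads
--         possible_heads = [h for h in range(1, input_dim + 1) if input_dim % h == 0]
--         return min(possible_heads, key=lambda x: abs(x - preferred_heads))
--
--     # Find the largest divisor of input_dim that's <= max_heads
--     possible_heads = [h for h in range(1, min(max_heads + 1, input_dim + 1)) if input_dim % h == 0]
--     return max(possible_heads) if possible_heads else 1
-- ===== SOURCE B (Python) =====
-- def _sorted_divisors(n):
--     """All positive divisors of n in ascending order, found in pairs up to sqrt(n)."""
--     small, large = [], []
--     i = 1
--     while i * i <= n:
--         if n % i == 0:
--             small.append(i)
--             if i != n // i: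
--                 large.append(n // i)
--         i += 1
--     large.reverse()
--     return small + large
--
--
-- def calculate_optimal_num_heads(input_dim, max_heads=16, preferred_heads=None):
--     if preferred_heads is not None:
--         if input_dim % preferred_heads == 0:
--             return preferred_heads
--         # closest divisor; on ties min() keeps the first = the smaller one
--         return min(_sorted_divisors(input_dim), key=lambda d: abs(d - preferred_heads))
--     # largest divisor <= min(max_heads, input_dim); divisors are ascending, so stop early
--     limit = min(max_heads, input_dim)
--     best = 1
--     for d in _sorted_divisors(input_dim):
--         if d > limit:
--             break
--         best = d
--     return best
-- ===== Notes on version B (the rewrite author's own statement) =====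
-- stated objective: faster
-- what changed: B enumerates the divisors of input_dim in (d, input_dim//d) pairs only up to sqrt(input_dim) (then merges the two halves into the same ascending list), instead of A's full scan of range(1, input_dim+1); the largest-divisor branch also breaks out of the ascending list early instead of building and maxing a filtered range.
import Mathlib
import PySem

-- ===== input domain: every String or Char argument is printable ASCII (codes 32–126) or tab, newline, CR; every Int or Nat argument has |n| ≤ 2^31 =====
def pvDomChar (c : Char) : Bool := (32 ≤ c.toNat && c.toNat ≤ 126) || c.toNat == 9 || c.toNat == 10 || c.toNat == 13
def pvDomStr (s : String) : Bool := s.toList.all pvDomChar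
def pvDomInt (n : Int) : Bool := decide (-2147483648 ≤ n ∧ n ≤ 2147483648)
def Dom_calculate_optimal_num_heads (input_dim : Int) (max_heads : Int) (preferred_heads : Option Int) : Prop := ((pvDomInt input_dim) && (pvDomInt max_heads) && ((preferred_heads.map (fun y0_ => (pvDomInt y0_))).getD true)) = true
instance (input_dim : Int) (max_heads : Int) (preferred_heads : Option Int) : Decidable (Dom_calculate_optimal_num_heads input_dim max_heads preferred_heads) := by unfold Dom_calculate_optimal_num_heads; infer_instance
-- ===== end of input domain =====

-- B replaces A's O(input_dim) scans over range(1, input_dim+1) by paired divisor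
-- enumeration up to sqrt(input_dim) (objective: faster, asymptotic O(sqrt(n)) vs O(n)).

-- ===== PORT A =====
def calculate_optimal_num_heads (input_dim : Int) (max_heads : Int) (preferred_heads : Option Int) : Int :=
  match preferred_heads with
  | some p =>
    if PySem.Int.mod input_dim p = 0 then p
    else
      let possible_heads := (PySem.List.pyRange 1 (input_dim + 1)).filter
        (fun h => PySem.Int.mod input_dim h = 0)
      match PySem.List.min? possible_heads (fun x => |x - p|) with
      | some m => m
      | none => 0      -- min([]) raises ValueError in Python; excluded by Pre_
  | none =>
    let possible_heads := (PySem.List.pyRange 1 (min (max_heads + 1) (input_dim + 1))).filter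
      (fun h => PySem.Int.mod input_dim h = 0)
    match PySem.List.max? possible_heads (fun x => x) with
    | some m => m
    | none => 1      -- 'max(possible_heads) if possible_heads else 1'

-- ===== PORT B =====
-- the while loop of _sorted_divisors
def sqrtDivLoop (n : Int) (i : Int) (small large : List Int) : List Int × List Int :=
  if _h : i * i ≤ n then
    if PySem.Int.mod n i = 0 then
      if i ≠ PySem.Int.floordiv n i then
        sqrtDivLoop n (i + 1) (small ++ [i]) (large ++ [PySem.Int.floordiv n i])
      else
        sqrtDivLoop n (i + 1) (small ++ [i]) large
    else
      sqrtDivLoop n (i + 1) small large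
  else
    (small, large)
termination_by (n + 1 - i).toNat
decreasing_by
  all_goals
    have hin : i ≤ n := by nlinarith [sq_nonneg i, sq_nonneg (i - 1)]
    omega

def sortedDivisors (n : Int) : List Int :=
  let (small, large) := sqrtDivLoop n 1 [] []
  small ++ large.reverse

-- the for/break loop over the ascending divisor list
def bestLoop (limit : Int) : List Int → Int → Int
  | [], best => best
  | d :: t, best => if d > limit then best else bestLoop limit t d

def calculate_optimal_num_heads_alt (input_dim : Int) (max_heads : Int) (preferred_heads : Option Int) : Int :=
  match preferred_heads with
  | some p =>
    if PySem.Int.mod input_dim p = 0 then p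
    else
      match PySem.List.min? (sortedDivisors input_dim) (fun x => |x - p|) with
      | some m => m
      | none => 0      -- min([]) raises ValueError in Python; excluded by Pre_
  | none =>
    let limit := min max_heads input_dim
    bestLoop limit (sortedDivisors input_dim) 1

-- ===== PRECONDITION & SPEC =====
-- Pre_ excludes exactly the inputs where the Python (A and B alike) raises:
-- preferred_heads = 0 (ZeroDivisionError in '%'), and a non-divisor preferred_heads
-- with input_dim < 1 (no divisors in range, min([]) raises ValueError).
def Pre_calculate_optimal_num_heads (input_dim : Int) (max_heads : Int) (preferred_heads : Option Int) : Prop :=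
  preferred_heads.getD 1 ≠ 0 ∧ (preferred_heads.getD 1 ∣ input_dim ∨ 1 ≤ input_dim)
instance (input_dim : Int) (max_heads : Int) (preferred_heads : Option Int) : Decidable (Pre_calculate_optimal_num_heads input_dim max_heads preferred_heads) := by unfold Pre_calculate_optimal_num_heads; infer_instance

def pvWitness_calculate_optimal_num_heads : Int × Int × Option Int := (12, 16, some 5)

def Spec_calculate_optimal_num_heads (input_dim : Int) (max_heads : Int) (preferred_heads : Option Int) (out : Int) : Prop := out = calculate_optimal_num_heads_alt input_dim max_heads preferred_heads
instance (input_dim : Int) (max_heads : Int) (preferred_heads : Option Int) (out : Int) : Decidable (Spec_calculate_optimal_num_heads input_dim max_heads preferred_heads out) := by unfold Spec_calculate_optimal_num_heads; infer_instance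

-- ===== CLAIM (what is proved, stated in full; the proofs are below) =====
def Claim_equal_calculate_optimal_num_heads : Prop := ∀ (input_dim : Int) (max_heads : Int) (preferred_heads : Option Int), Dom_calculate_optimal_num_heads input_dim max_heads preferred_heads → Pre_calculate_optimal_num_heads input_dim max_heads preferred_heads → Spec_calculate_optimal_num_heads input_dim max_heads preferred_heads (calculate_optimal_num_heads input_dim max_heads preferred_heads)

-- ===== LEMMAS AND PROOFS =====

-- closed forms for the state of sqrtDivLoop
def candSmall (n a : Int) : List Int :=
  (PySem.List.pyRange a (n + 1)).filter
    (fun j => decide (j * j ≤ n) && decide (PySem.Int.mod n j = 0))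

def candLarge (n a : Int) : List Int :=
  ((candSmall n a).filter (fun j => decide (j ≠ PySem.Int.floordiv n j))).map
    (fun j => PySem.Int.floordiv n j)

theorem candSmall_eq_nil {n a : Int} (ha : 1 ≤ a) (h : ¬ a * a ≤ n) : candSmall n a = [] := by
  unfold candSmall
  rw [List.filter_eq_nil_iff]
  intro j hj
  rw [PySem.List.mem_pyRange_one] at hj
  have : ¬ j * j ≤ n := by nlinarith
  simp [this]

theorem sqrtDivLoop_eq_aux (n : Int) : ∀ (k : Nat) (i : Int), (n + 1 - i).toNat ≤ k → 1 ≤ i → ∀ small large,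
    sqrtDivLoop n i small large = (small ++ candSmall n i, large ++ candLarge n i) := by
  intro k
  induction k with
  | zero =>
    intro i hk hi small large
    have h : ¬ i * i ≤ n := by
      intro hle
      have h1 : n < i := by omega
      nlinarith
    rw [sqrtDivLoop, dif_neg h, candSmall_eq_nil hi h]
    unfold candLarge
    rw [candSmall_eq_nil hi h]
    simp
  | succ k ih =>
  intro i hk hi small large
  by_cases h : i * i ≤ n
  · have hin : i ≤ n := by nlinarith
    have hcons : PySem.List.pyRange i (n + 1) = i :: PySem.List.pyRange (i + 1) (n + 1) :=
      PySem.List.pyRange_one_cons (by omega)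
    have hsm : candSmall n i =
        (if PySem.Int.mod n i = 0 then [i] else []) ++ candSmall n (i + 1) := by
      unfold candSmall
      rw [hcons]
      by_cases hm : PySem.Int.mod n i = 0 <;> simp [h, hm]
    by_cases hm : PySem.Int.mod n i = 0
    · have hlg : candLarge n i =
          (if i ≠ PySem.Int.floordiv n i then [PySem.Int.floordiv n i] else []) ++ candLarge n (i + 1) := by
        unfold candLarge
        rw [hsm]
        by_cases hne : i ≠ PySem.Int.floordiv n i <;> simp [hm, hne]
      by_cases hne : i ≠ PySem.Int.floordiv n i
      · rw [sqrtDivLoop, dif_pos h, if_pos hm, if_pos hne,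
          ih (i + 1) (by omega) (by omega), hsm, hlg]
        simp [hm, hne]
      · rw [sqrtDivLoop, dif_pos h, if_pos hm, if_neg hne,
          ih (i + 1) (by omega) (by omega), hsm, hlg]
        simp [hm, hne]
    · have hlg : candLarge n i = candLarge n (i + 1) := by
        unfold candLarge
        rw [hsm]
        simp [hm]
      rw [sqrtDivLoop, dif_pos h, if_neg hm, ih (i + 1) (by omega) (by omega), hsm, hlg]
      simp [hm]
  · rw [sqrtDivLoop, dif_neg h, candSmall_eq_nil hi h]
    unfold candLarge
    rw [candSmall_eq_nil hi h]
    simp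

theorem sqrtDivLoop_eq (n i : Int) (hi : 1 ≤ i) (small large : List Int) :
    sqrtDivLoop n i small large = (small ++ candSmall n i, large ++ candLarge n i) :=
  sqrtDivLoop_eq_aux n (n + 1 - i).toNat i le_rfl hi small large

-- A's candidate list, shared shape of both branches of port A
def divList (n : Int) : List Int :=
  (PySem.List.pyRange 1 (n + 1)).filter (fun h => PySem.Int.mod n h = 0)

theorem eq_of_pairwise_lt_mem {xs ys : List Int} (hx : xs.Pairwise (· < ·))
    (hy : ys.Pairwise (· < ·)) (h : ∀ a, a ∈ xs ↔ a ∈ ys) : xs = ys := by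
  have hnx : xs.Nodup := hx.imp (fun h => ne_of_lt h)
  have hny : ys.Nodup := hy.imp (fun h => ne_of_lt h)
  exact List.eq_of_perm_of_sorted (fun a b _ _ hab hba => le_antisymm hab hba)
    (hx.imp le_of_lt) (hy.imp le_of_lt) ((List.perm_ext_iff_of_nodup hnx hny).mpr h)

theorem mem_divList {n x : Int} : x ∈ divList n ↔ 1 ≤ x ∧ x < n + 1 ∧ x ∣ n := by
  simp [divList, List.mem_filter, PySem.List.mem_pyRange_one,
    PySem.Int.mod_eq_zero_iff_dvd, and_assoc]

theorem pairwise_divList (n : Int) : (divList n).Pairwise (· < ·) :=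
  (PySem.List.pairwise_lt_pyRange_one 1 (n + 1)).filter _

theorem mem_candSmall {n x : Int} : x ∈ candSmall n 1 ↔ 1 ≤ x ∧ x * x ≤ n ∧ x ∣ n := by
  simp only [candSmall, List.mem_filter, PySem.List.mem_pyRange_one,
    Bool.and_eq_true, decide_eq_true_iff, PySem.Int.mod_eq_zero_iff_dvd]
  constructor
  · rintro ⟨⟨h1, _⟩, h3, h4⟩; exact ⟨h1, h3, h4⟩
  · rintro ⟨h1, h3, h4⟩
    exact ⟨⟨h1, by nlinarith⟩, h3, h4⟩

theorem one_le_ediv_of_dvd {n x : Int} (hn : 1 ≤ n) (hx : 1 ≤ x) (hd : x ∣ n) :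
    1 ≤ n / x := by
  have hmul : x * (n / x) = n := Int.mul_ediv_cancel' hd
  rcases Int.lt_or_le (n / x) 1 with h | h
  · exfalso; nlinarith
  · exact h

theorem mem_candLarge {n x : Int} (hn : 1 ≤ n) :
    x ∈ candLarge n 1 ↔ 1 ≤ x ∧ n < x * x ∧ x ∣ n := by
  simp only [candLarge, List.mem_map, List.mem_filter, mem_candSmall, decide_eq_true_iff]
  constructor
  · rintro ⟨j, ⟨⟨hj1, hjj, hjd⟩, hne⟩, rfl⟩
    have hj0 : (0 : Int) < j := by omega
    rw [PySem.Int.floordiv_eq_ediv_of_pos hj0] at *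
    have hmul : j * (n / j) = n := Int.mul_ediv_cancel' hjd
    have hx1 : 1 ≤ n / j := one_le_ediv_of_dvd hn (by omega) hjd
    have hjlt : j < n / j := by
      rcases Int.lt_or_le j (n / j) with h | h
      · exact h
      · exfalso; rcases lt_or_eq_of_le h with h' | h'
        · nlinarith
        · exact hne h'.symm
    refine ⟨hx1, by nlinarith, ⟨j, by linarith [hmul]⟩⟩
  · rintro ⟨hx1, hxx, hxd⟩
    have hx0 : (0 : Int) < x := by omega
    have hmul : x * (n / x) = n := Int.mul_ediv_cancel' hxd
    have hj1 : 1 ≤ n / x := one_le_ediv_of_dvd hn hx1 hxd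
    have hjx : n / x < x := by nlinarith
    have hback : n / (n / x) = x := by
      have h := Int.mul_ediv_cancel_left (a := n / x) x (by omega)
      rwa [show (n / x) * x = n by linarith] at h
    refine ⟨n / x, ⟨⟨hj1, by nlinarith, ⟨x, by linarith [hmul]⟩⟩, ?_⟩, ?_⟩
    · rw [PySem.Int.floordiv_eq_ediv_of_pos (by omega : (0:Int) < n / x), hback]
      omega
    · rw [PySem.Int.floordiv_eq_ediv_of_pos (by omega : (0:Int) < n / x), hback]

theorem sortedDivisors_eq (n : Int) : sortedDivisors n = divList n := by
  rcases Int.lt_or_le n 1 with hn | hn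
  case inl =>
    unfold sortedDivisors
    rw [sqrtDivLoop_eq n 1 le_rfl, candSmall_eq_nil le_rfl (by nlinarith)]
    unfold candLarge divList
    rw [candSmall_eq_nil le_rfl (by nlinarith), PySem.List.pyRange_one_eq_nil (by omega)]
    simp
  case inr =>
    unfold sortedDivisors
    rw [sqrtDivLoop_eq n 1 le_rfl]
    simp only [List.nil_append]
    apply eq_of_pairwise_lt_mem
    · rw [List.pairwise_append]
      refine ⟨(PySem.List.pairwise_lt_pyRange_one 1 (n+1)).filter _, ?_, ?_⟩
      · rw [List.pairwise_reverse]
        unfold candLarge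
        rw [List.pairwise_map]
        have hbase : ((candSmall n 1).filter
            (fun j => decide (j ≠ PySem.Int.floordiv n j))).Pairwise (· < ·) :=
          ((PySem.List.pairwise_lt_pyRange_one 1 (n+1)).filter _).filter _
        refine hbase.imp_of_mem (fun {a b} ha hb hab => ?_)
        have ha' := mem_candSmall.mp (List.mem_of_mem_filter ha)
        have hb' := mem_candSmall.mp (List.mem_of_mem_filter hb)
        rw [PySem.Int.floordiv_eq_ediv_of_pos (by omega : (0:Int) < a),
            PySem.Int.floordiv_eq_ediv_of_pos (by omega : (0:Int) < b)]
        have hma : a * (n / a) = n := Int.mul_ediv_cancel' ha'.2.2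
        have hmb : b * (n / b) = n := Int.mul_ediv_cancel' hb'.2.2
        have h1a : 1 ≤ n / a := by nlinarith [Int.lt_or_le (n / a) 1, ha'.1]
        have h1b : 1 ≤ n / b := by nlinarith [Int.lt_or_le (n / b) 1, hb'.1]
        nlinarith [ha'.1, hb'.1]
      · intro x hx y hy
        rw [List.mem_reverse] at hy
        have hx' := mem_candSmall.mp hx
        have hy' := (mem_candLarge hn).mp hy
        nlinarith [hx'.1, hx'.2.1, hy'.1, hy'.2.1]
    · exact pairwise_divList n
    · intro a
      rw [List.mem_append, List.mem_reverse, mem_candSmall, mem_candLarge hn, mem_divList]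
      constructor
      · rintro (⟨h1, h2, h3⟩ | ⟨h1, h2, h3⟩)
        · exact ⟨h1, by have := Int.le_of_dvd (by omega) h3; omega, h3⟩
        · exact ⟨h1, by have := Int.le_of_dvd (by omega) h3; omega, h3⟩
      · rintro ⟨h1, h2, h3⟩
        rcases Int.lt_or_le n (a * a) with h | h
        · exact Or.inr ⟨h1, h, h3⟩
        · exact Or.inl ⟨h1, h, h3⟩

theorem possible_eq (n mh : Int) :
    (PySem.List.pyRange 1 (min (mh + 1) (n + 1))).filter (fun h => PySem.Int.mod n h = 0) =
      (divList n).filter (fun d => d ≤ min mh n) := by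
  apply eq_of_pairwise_lt_mem
  · exact (PySem.List.pairwise_lt_pyRange_one _ _).filter _
  · exact (pairwise_divList n).filter _
  · intro a
    simp only [List.mem_filter, PySem.List.mem_pyRange_one, mem_divList,
      decide_eq_true_iff, PySem.Int.mod_eq_zero_iff_dvd]
    constructor
    · rintro ⟨⟨h1, h2⟩, h3⟩
      exact ⟨⟨h1, by omega, h3⟩, by omega⟩
    · rintro ⟨⟨h1, h2, h3⟩, h4⟩
      exact ⟨⟨h1, by omega⟩, h3⟩

theorem bestLoop_eq (lim : Int) : ∀ (xs : List Int) (b : Int), xs.Pairwise (· < ·) →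
    bestLoop lim xs b = (xs.filter (fun d => d ≤ lim)).foldl (fun _ d => d) b := by
  intro xs
  induction xs with
  | nil => intro b _; rfl
  | cons d t ih =>
    intro b hp
    rcases List.pairwise_cons.mp hp with ⟨hd, ht⟩
    by_cases h : d > lim
    · rw [bestLoop, if_pos h, List.filter_cons, if_neg (by simpa using (by omega : ¬ d ≤ lim))]
      rw [List.filter_eq_nil_iff.mpr (fun e he => by simpa using (by have := hd e he; omega : ¬ e ≤ lim))]
      rfl
    · rw [bestLoop, if_neg h, List.filter_cons, if_pos (by simpa using (by omega : d ≤ lim))]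
      exact ih d ht

theorem foldl_keep_eq_max : ∀ (t : List Int) (x : Int), (x :: t).Pairwise (· < ·) →
    t.foldl max x = t.foldl (fun _ d => d) x := by
  intro t
  induction t with
  | nil => intro x _; rfl
  | cons d t' ih =>
    intro x hp
    have hxd : x < d := (List.pairwise_cons.mp hp).1 d (by simp)
    rw [List.foldl_cons, List.foldl_cons, max_eq_right (le_of_lt hxd)]
    exact ih d (List.pairwise_cons.mp hp).2

-- ===== VERDICT (by name: the statement is the Claim_ definition above) =====
theorem calculate_optimal_num_heads_spec : Claim_equal_calculate_optimal_num_heads := by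
  intro n mh ph _hdom hpre
  unfold Spec_calculate_optimal_num_heads
  match ph with
  | some p =>
    by_cases hm : PySem.Int.mod n p = 0
    · simp [calculate_optimal_num_heads, calculate_optimal_num_heads_alt, hm]
    · simp only [calculate_optimal_num_heads, calculate_optimal_num_heads_alt, if_neg hm]
      rw [sortedDivisors_eq]
      rfl
  | none =>
    simp only [calculate_optimal_num_heads, calculate_optimal_num_heads_alt]
    rw [sortedDivisors_eq, bestLoop_eq _ _ _ (pairwise_divList n)]
    rw [show ((divList n).filter (fun d => d ≤ min mh n)) =
        (PySem.List.pyRange 1 (min (mh + 1) (n + 1))).filter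
          (fun h => PySem.Int.mod n h = 0) from (possible_eq n mh).symm]
    cases hP : (PySem.List.pyRange 1 (min (mh + 1) (n + 1))).filter
        (fun h => PySem.Int.mod n h = 0) with
    | nil => simp [PySem.List.max?]
    | cons x t =>
      rw [PySem.List.max?_id_cons]
      have hpw : (x :: t).Pairwise (· < ·) := by
        rw [← hP]; exact (PySem.List.pairwise_lt_pyRange_one _ _).filter _
      rw [List.foldl_cons]
      show t.foldl max x = t.foldl (fun _ d => d) x
      exact foldl_keep_eq_max t x hpw
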